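-- pv_equiv track=rewrite | github.com/JackCai1206/transformer_arithmetic_v2 | lib/data_formats.py | split_digits
-- ===== SOURCE A (Python) =====
-- def split_digits(a, b):
--     a_digits = []
--     b_digits = []
--     carries = [0]
--     while True:
--         a_digits.append(a % 10)
--         b_digits.append(b % 10)
--         carries.append((a % 10 + b % 10) // 10)
--         a //= 10
--         b //= 10
--         if a == 0 and b == 0:
--             break
--     return a_digits, b_digits, carries
-- ===== SOURCE B (Python) =====
-- def split_digits(a, b):
--     n = max(len(str(a)), len(str(b)))
--     a_digits = [(a // 10**i) % 10 for i in range(n)]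
--     b_digits = [(b // 10**i) % 10 for i in range(n)]
--     carries = [0] + [(ad + bd) // 10 for ad, bd in zip(a_digits, b_digits)]
--     return a_digits, b_digits, carries
-- ===== Notes on version B (the rewrite author's own statement) =====
-- stated objective: alternative
-- what changed: Replaces the fused while-True/break loop (repeated in-place division with appends) by a bound-then-extract structure: compute the digit count n = max(len(str(a)), len(str(b))) up front, extract digits positionally as (x // 10**i) % 10 over range(n), and compute carries in a separate zip pass.
import Mathlib
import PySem

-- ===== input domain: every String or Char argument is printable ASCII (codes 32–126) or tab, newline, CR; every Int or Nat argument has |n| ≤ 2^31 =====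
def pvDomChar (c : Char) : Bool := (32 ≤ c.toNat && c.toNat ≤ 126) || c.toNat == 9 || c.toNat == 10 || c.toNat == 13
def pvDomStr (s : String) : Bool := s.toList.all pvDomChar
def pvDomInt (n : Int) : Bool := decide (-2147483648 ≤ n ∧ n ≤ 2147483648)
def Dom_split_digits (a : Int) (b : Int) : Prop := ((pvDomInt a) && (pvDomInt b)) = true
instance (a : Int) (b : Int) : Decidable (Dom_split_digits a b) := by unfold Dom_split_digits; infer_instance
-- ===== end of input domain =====

-- B replaces A's fused while-True digit loop by bound-then-extract: digit count from len(str(·)),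
-- positional extraction over range(n), and a separate zip pass for carries (objective: alternative).

-- ===== PORT A =====
-- while True: append digits/carry, divide, break when both quotients are 0.
-- fuel only makes the recursion total; it never runs out on inputs satisfying Pre_ (proved below).
def splitLoop (fuel : Nat) (a b : Int) (ad bd cs : List Int) : List Int × List Int × List Int :=
  let ad' := ad ++ [PySem.Int.mod a 10]
  let bd' := bd ++ [PySem.Int.mod b 10]
  let cs' := cs ++ [PySem.Int.floordiv (PySem.Int.mod a 10 + PySem.Int.mod b 10) 10]
  let a' := PySem.Int.floordiv a 10
  let b' := PySem.Int.floordiv b 10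
  if a' = 0 ∧ b' = 0 then (ad', bd', cs')
  else
    match fuel with
    | 0 => (ad', bd', cs')
    | f + 1 => splitLoop f a' b' ad' bd' cs'

def split_digits (a : Int) (b : Int) : List Int × List Int × List Int :=
  splitLoop (a.natAbs + b.natAbs) a b [] [] [0]

-- ===== PORT B =====
-- n = max(len(str(a)), len(str(b))); digits by positional extraction; carries by a zip pass.
def split_digits_alt (a : Int) (b : Int) : List Int × List Int × List Int :=
  let n : Int := max (PySem.Str.len (PySem.Int.toStr a)) (PySem.Str.len (PySem.Int.toStr b))
  let aDigits := (PySem.List.pyRange 0 n 1).map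
    (fun i => PySem.Int.mod (PySem.Int.floordiv a ((10 : Int) ^ i.toNat)) 10)
  let bDigits := (PySem.List.pyRange 0 n 1).map
    (fun i => PySem.Int.mod (PySem.Int.floordiv b ((10 : Int) ^ i.toNat)) 10)
  let carries := [(0 : Int)] ++ (aDigits.zip bDigits).map (fun p => PySem.Int.floordiv (p.1 + p.2) 10)
  (aDigits, bDigits, carries)

-- ===== PRECONDITION & SPEC =====
-- A's while-loop never terminates when a or b is negative (floor division by 10 never reaches 0),
-- so Pre_ admits exactly the inputs on which the Python A returns: both arguments nonnegative.
def Pre_split_digits (a : Int) (b : Int) : Prop := 0 ≤ a ∧ 0 ≤ b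
instance (a : Int) (b : Int) : Decidable (Pre_split_digits a b) := by unfold Pre_split_digits; infer_instance
def pvWitness_split_digits : Int × Int := (95, 7)

def Spec_split_digits (a : Int) (b : Int) (out : List Int × List Int × List Int) : Prop := out = split_digits_alt a b
instance (a : Int) (b : Int) (out : List Int × List Int × List Int) : Decidable (Spec_split_digits a b out) := by unfold Spec_split_digits; infer_instance

-- ===== CLAIM (what is proved, stated in full; the proofs are below) =====
def Claim_equal_split_digits : Prop := ∀ (a : Int) (b : Int), Dom_split_digits a b → Pre_split_digits a b → Spec_split_digits a b (split_digits a b)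

-- ===== LEMMAS AND PROOFS =====

-- number of decimal digits (= A's loop-iteration count)
def ndig (m : Nat) : Nat :=
  if h : m < 10 then 1 else ndig (m / 10) + 1
decreasing_by exact Nat.div_lt_self (by omega) (by omega)

def dig (N : Nat) (x : Int) : List Int :=
  (List.range N).map (fun i => PySem.Int.mod (PySem.Int.floordiv x ((10 : Int) ^ i)) 10)

def carr (N : Nat) (x y : Int) : List Int :=
  (List.range N).map (fun i =>
    PySem.Int.floordiv
      (PySem.Int.mod (PySem.Int.floordiv x ((10 : Int) ^ i)) 10 +
       PySem.Int.mod (PySem.Int.floordiv y ((10 : Int) ^ i)) 10) 10)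

lemma ndig_lt10 {m : Nat} (h : m < 10) : ndig m = 1 := by rw [ndig]; simp [h]

lemma ndig_ge10 {m : Nat} (h : 10 ≤ m) : ndig m = ndig (m / 10) + 1 := by
  rw [ndig]; simp [Nat.not_lt.mpr h]

lemma ndig_pos (m : Nat) : 1 ≤ ndig m := by
  by_cases h : m < 10
  · rw [ndig_lt10 h]
  · rw [ndig_ge10 (by omega)]; omega

lemma ndig_le (m : Nat) : ndig m ≤ m + 1 := by
  by_cases h : m < 10
  · rw [ndig_lt10 h]; omega
  · rw [ndig_ge10 (by omega)]
    have h1 := ndig_le (m / 10)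
    have h2 : m / 10 < m := Nat.div_lt_self (by omega) (by omega)
    omega
decreasing_by exact Nat.div_lt_self (by omega) (by omega)

lemma fdiv10 (m : Nat) : PySem.Int.floordiv (m : Int) 10 = ((m / 10 : Nat) : Int) := by
  exact_mod_cast PySem.Int.floordiv_natCast m 10

lemma fdiv10_eq_zero_iff (m : Nat) : PySem.Int.floordiv (m : Int) 10 = 0 ↔ m < 10 := by
  rw [fdiv10]
  constructor
  · intro h; have : m / 10 = 0 := by exact_mod_cast h
    omega
  · intro h; have : m / 10 = 0 := by omega
    simp [this]

lemma fd_fd (x : Int) (i : Nat) :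
    PySem.Int.floordiv (PySem.Int.floordiv x 10) ((10 : Int) ^ i) =
      PySem.Int.floordiv x ((10 : Int) ^ (i + 1)) := by
  have h2 : (0 : Int) < (10 : Int) ^ i := by positivity
  have h3 : (0 : Int) < (10 : Int) ^ (i + 1) := by positivity
  rw [PySem.Int.floordiv_eq_ediv_of_pos (show (0:Int) < 10 by norm_num),
    PySem.Int.floordiv_eq_ediv_of_pos h2, PySem.Int.floordiv_eq_ediv_of_pos h3,
    Int.ediv_ediv_of_nonneg (by norm_num), pow_succ, mul_comm]

lemma fd_one (x : Int) : PySem.Int.floordiv x ((10 : Int) ^ 0) = x := by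
  rw [pow_zero, PySem.Int.floordiv_eq_ediv_of_pos (show (0:Int) < 1 by norm_num), Int.ediv_one]

lemma dig_succ (N : Nat) (x : Int) :
    dig (N + 1) x = PySem.Int.mod x 10 :: dig N (PySem.Int.floordiv x 10) := by
  unfold dig
  rw [List.range_succ_eq_map, List.map_cons, List.map_map]
  congr 1
  · rw [fd_one]
  · apply List.map_congr_left
    intro i _
    simp only [Function.comp_apply, Nat.succ_eq_add_one, fd_fd]

lemma carr_succ (N : Nat) (x y : Int) :
    carr (N + 1) x y =
      PySem.Int.floordiv (PySem.Int.mod x 10 + PySem.Int.mod y 10) 10 ::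
        carr N (PySem.Int.floordiv x 10) (PySem.Int.floordiv y 10) := by
  unfold carr
  rw [List.range_succ_eq_map, List.map_cons, List.map_map]
  congr 1
  · rw [fd_one, fd_one]
  · apply List.map_congr_left
    intro i _
    simp only [Function.comp_apply, Nat.succ_eq_add_one, fd_fd]

lemma dig_one (x : Int) : dig 1 x = [PySem.Int.mod x 10] := by
  rw [show (1 : Nat) = 0 + 1 from rfl, dig_succ]; rfl

lemma carr_one (x y : Int) :
    carr 1 x y = [PySem.Int.floordiv (PySem.Int.mod x 10 + PySem.Int.mod y 10) 10] := by
  rw [show (1 : Nat) = 0 + 1 from rfl, carr_succ]; rfl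

lemma max_ndig_div {m k : Nat} (h : 10 ≤ m ∨ 10 ≤ k) :
    max (ndig (m / 10)) (ndig (k / 10)) = max (ndig m) (ndig k) - 1 := by
  by_cases hm : m < 10 <;> by_cases hk : k < 10
  · omega
  · have e1 : ndig (m / 10) = 1 := ndig_lt10 (by omega)
    have e2 : ndig m = 1 := ndig_lt10 hm
    have e3 : ndig k = ndig (k / 10) + 1 := ndig_ge10 (by omega)
    have := ndig_pos (k / 10)
    omega
  · have e1 : ndig (k / 10) = 1 := ndig_lt10 (by omega)
    have e2 : ndig k = 1 := ndig_lt10 hk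
    have e3 : ndig m = ndig (m / 10) + 1 := ndig_ge10 (by omega)
    have := ndig_pos (m / 10)
    omega
  · have e1 : ndig m = ndig (m / 10) + 1 := ndig_ge10 (by omega)
    have e2 : ndig k = ndig (k / 10) + 1 := ndig_ge10 (by omega)
    have := ndig_pos (m / 10); have := ndig_pos (k / 10)
    omega

lemma splitLoop_eq (fuel : Nat) : ∀ (m k : Nat),
    max (ndig m) (ndig k) - 1 ≤ fuel → ∀ (ad bd cs : List Int),
    splitLoop fuel (m : Int) (k : Int) ad bd cs =
      (ad ++ dig (max (ndig m) (ndig k)) (m : Int),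
       bd ++ dig (max (ndig m) (ndig k)) (k : Int),
       cs ++ carr (max (ndig m) (ndig k)) (m : Int) (k : Int)) := by
  induction fuel with
  | zero =>
    intro m k hf ad bd cs
    have hsm : m < 10 ∧ k < 10 := by
      by_contra hc
      have h10 : 10 ≤ m ∨ 10 ≤ k := by omega
      have := ndig_pos m; have := ndig_pos k
      rcases h10 with h | h
      · have := ndig_ge10 h; have := ndig_pos (m / 10); omega
      · have := ndig_ge10 h; have := ndig_pos (k / 10); omega
    obtain ⟨hm, hk⟩ := hsm
    rw [ndig_lt10 hm, ndig_lt10 hk, Nat.max_self]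
    simp only [splitLoop]
    rw [if_pos ⟨(fdiv10_eq_zero_iff m).mpr hm, (fdiv10_eq_zero_iff k).mpr hk⟩]
    simp only [dig_one, carr_one]
  | succ f ih =>
    intro m k hf ad bd cs
    by_cases hsmall : m < 10 ∧ k < 10
    · obtain ⟨hm, hk⟩ := hsmall
      rw [ndig_lt10 hm, ndig_lt10 hk, Nat.max_self]
      simp only [splitLoop]
      rw [if_pos ⟨(fdiv10_eq_zero_iff m).mpr hm, (fdiv10_eq_zero_iff k).mpr hk⟩]
      simp only [dig_one, carr_one]
    · have h10 : 10 ≤ m ∨ 10 ≤ k := by omega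
      have hN2 : 2 ≤ max (ndig m) (ndig k) := by
        have := ndig_pos m; have := ndig_pos k
        have := ndig_pos (m / 10); have := ndig_pos (k / 10)
        rcases h10 with h | h
        · have := ndig_ge10 h
          have := Nat.le_max_left (ndig m) (ndig k); omega
        · have := ndig_ge10 h
          have := Nat.le_max_right (ndig m) (ndig k); omega
      simp only [splitLoop]
      rw [if_neg (by
        rintro ⟨h1, h2⟩
        rw [fdiv10_eq_zero_iff] at h1 h2
        omega)]
      rw [fdiv10 m, fdiv10 k]
      rw [ih (m / 10) (k / 10) (by rw [max_ndig_div h10]; omega)]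
      rw [max_ndig_div h10]
      rw [show max (ndig m) (ndig k) = (max (ndig m) (ndig k) - 1) + 1 by omega,
        dig_succ, dig_succ, carr_succ, fdiv10 m, fdiv10 k]
      simp

lemma toDigitsCore_len (f : Nat) : ∀ (n : Nat) (l : List Char), 0 < f → n < 10 ^ f →
    (Nat.toDigitsCore 10 f n l).length = ndig n + l.length := by
  induction f with
  | zero => intro n l hf _; omega
  | succ f ih =>
    intro n l _ hn
    rw [Nat.toDigitsCore]
    by_cases h : n / 10 = 0
    · rw [if_pos h, ndig_lt10 (by omega)]
      simp
      omega
    · rw [if_neg h]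
      have hf' : 0 < f := by
        by_contra hc
        have hz : f = 0 := by omega
        subst hz
        simp at hn
        omega
      have hlt : n / 10 < 10 ^ f := by
        apply Nat.div_lt_of_lt_mul
        calc n < 10 ^ (f + 1) := hn
        _ = 10 * 10 ^ f := by rw [pow_succ, mul_comm]
      rw [ih (n / 10) _ hf' hlt,
        show ndig n = ndig (n / 10) + 1 from ndig_ge10 (by omega)]
      simp
      omega

lemma len_toChars (m : Nat) : (PySem.Int.toChars (m : Int)).length = ndig m := by
  unfold PySem.Int.toChars
  rw [if_neg (by omega), Int.toNat_natCast]
  unfold Nat.toDigits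
  have hb : m < 10 ^ (m + 1) := by
    have h1 : m < 10 ^ m := Nat.lt_pow_self (by norm_num)
    have h2 : (10 : Nat) ^ m ≤ 10 ^ (m + 1) := Nat.pow_le_pow_right (by norm_num) (by omega)
    omega
  rw [toDigitsCore_len (m + 1) m [] (by omega) hb]
  simp

lemma alt_eq (m k : Nat) :
    split_digits_alt (m : Int) (k : Int) =
      (dig (max (ndig m) (ndig k)) (m : Int),
       dig (max (ndig m) (ndig k)) (k : Int),
       (0 : Int) :: carr (max (ndig m) (ndig k)) (m : Int) (k : Int)) := by
  have hlen : ∀ j : Nat, PySem.Str.len (PySem.Int.toStr (j : Int)) = ((ndig j : Nat) : Int) := by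
    intro j
    rw [PySem.Str.len_eq, PySem.Int.toList_toStr, len_toChars]
  have hmax : max (PySem.Str.len (PySem.Int.toStr (m : Int))) (PySem.Str.len (PySem.Int.toStr (k : Int)))
      = ((max (ndig m) (ndig k) : Nat) : Int) := by
    rw [hlen m, hlen k, Nat.cast_max]
  simp only [split_digits_alt, hmax]
  set N := max (ndig m) (ndig k) with hN
  have hr : PySem.List.pyRange 0 (N : Int) 1 = (List.range N).map (fun j : Nat => (j : Int)) := by
    rw [PySem.List.pyRange_one]
    simp
  rw [hr]
  simp only [List.map_map, List.zip_map', Function.comp_def, Int.toNat_natCast]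
  rfl

-- ===== VERDICT (by name: the statement is the Claim_ definition above) =====
theorem split_digits_spec : Claim_equal_split_digits := by
  intro a b _ hpre
  obtain ⟨ha, hb⟩ := hpre
  unfold Spec_split_digits
  obtain ⟨m, rfl⟩ : ∃ m : Nat, (m : Int) = a := ⟨a.toNat, Int.toNat_of_nonneg ha⟩
  obtain ⟨k, rfl⟩ : ∃ k : Nat, (k : Int) = b := ⟨b.toNat, Int.toNat_of_nonneg hb⟩
  unfold split_digits
  rw [alt_eq]
  have hfuel : max (ndig m) (ndig k) - 1 ≤ ((m : Int).natAbs + (k : Int).natAbs) := by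
    have := ndig_le m
    have := ndig_le k
    simp only [Int.natAbs_natCast]
    omega
  rw [splitLoop_eq _ m k hfuel]
  simp
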